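-- pv_equiv track=rewrite | github.com/kotsky/programming-exercises | String/Pattern Matcher.py | patternMatcher
-- ===== SOURCE A (Python) =====
-- def patternMatcher(pattern, string):
--     if pattern == "" or len(pattern) > len(string):
--         return []
--
--     new_pattern = separartion(pattern)
--     flag = None
--     if new_pattern[0] != 'x':
--         flag = 1
--         for idx in range(len(new_pattern)):
--             if new_pattern[idx] == 'x':
--                 new_pattern[idx] = 'y'
--             else:
--                 new_pattern[idx] = 'x'
--
--     count_x = 0
--     count_y = 0
--     position_y = None
--     for idx in range(len(new_pattern)):
--         if new_pattern[idx] == 'x':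
--             count_x += 1
--         else:
--             count_y += 1
--             if position_y is None:
--                 position_y = idx
--
--     if count_x == 0 or count_y == 0:
--         count = count_x if count_x != 0 else count_y
--         if len(string) % count != 0:
--             return []
--         length = len(string)
--         substring_range = length//count
--         substring = string[0:substring_range]
--         for i in range(1, count):
--             if substring != string[i*substring_range:(i*substring_range+substring_range)]:
--                 return []
--
--         return [substring, ""] if flag is None else ["", substring]
--
--     else:
--
--         for end in range(1, len(string)):
--             x = string[0:end]
--             len_x = len(x)
--             len_y = (len(string) - len_x*count_x)//count_y if (len(string) - len_x*count_x) % count_y == 0 else -1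
--             if len_y == -1:
--                 continue
--             y = string[len_x*position_y:(len_y + len_x*position_y)]
--
--             check_list = new_pattern.copy()
--             for idx in range(len(check_list)):
--                 if check_list[idx] == 'x':
--                     check_list[idx] = x
--                 else:
--                     check_list[idx] = y
--
--             if "".join(check_list) == string:
--                 return [x, y] if flag is None else [y, x]
--
--         return []
--
-- def separartion(string):
--     array = []
--     for letter in string:
--         array.append(letter)
--     return array
-- ===== SOURCE B (Python) =====
-- def patternMatcher(pattern, string):
--     # Rolling prefix hashes: each candidate (len_x, len_y) is screened by O(1)
--     # segment-hash comparisons instead of rebuilding the candidate string;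
--     # a full check runs only when every hash lines up.
--     n = len(string)
--     m = len(pattern)
--     if pattern == "" or m > n:
--         return []
--     lead = pattern[0] == 'x'
--     isx = [(c == 'x') == lead for c in pattern]  # True = role of the leading letter
--     cx = isx.count(True)
--     cy = m - cx
--     if cy == 0:
--         # the pattern is one letter repeated: the string must be one block repeated
--         if n % cx:
--             return []
--         sub = string[:n // cx]
--         if sub * cx != string:
--             return []
--         return [sub, ""] if lead else ["", sub]
--     MOD = (1 << 61) - 1
--     BASE = 1000003
--     h = [0] * (n + 1)
--     pw = [1] * (n + 1)
--     for i, c in enumerate(string):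
--         h[i + 1] = (h[i] * BASE + ord(c)) % MOD
--         pw[i + 1] = pw[i] * BASE % MOD
--
--     def cut(i, j):  # hash of string[i:j]
--         return (h[j] - h[i] * pw[j - i]) % MOD
--
--     py = isx.index(False)
--     for lx in range(1, n):
--         rem = n - lx * cx
--         if rem < 0 or rem % cy:
--             continue
--         ly = rem // cy
--         p = lx * py
--         hx = cut(0, lx)
--         hy = cut(p, p + ly)
--         pos = 0
--         ok = True
--         for b in isx:
--             L, hs = (lx, hx) if b else (ly, hy)
--             if cut(pos, pos + L) != hs:
--                 ok = False
--                 break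
--             pos += L
--         if not ok:
--             continue
--         # hashes all line up: confirm for real (guards against collisions)
--         x, y = string[:lx], string[p:p + ly]
--         pos = 0
--         for b in isx:
--             seg = x if b else y
--             if not string.startswith(seg, pos):
--                 ok = False
--                 break
--             pos += len(seg)
--         if ok:
--             return [x, y] if lead else [y, x]
--     return []
-- ===== Notes on version B (the rewrite author's own statement) =====
-- stated objective: faster
-- what changed: B precomputes rolling prefix-hash and power tables over the string and screens every candidate (len_x, len_y) by O(1) segment-hash comparisons per pattern slot (one exact startswith confirmation only when every hash lines up), instead of rebuilding the whole candidate string with join and comparing it for every candidate; the one-letter-pattern case is decided by string repetition (sub * count == string) instead of a block-comparison loop.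
import Mathlib
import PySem

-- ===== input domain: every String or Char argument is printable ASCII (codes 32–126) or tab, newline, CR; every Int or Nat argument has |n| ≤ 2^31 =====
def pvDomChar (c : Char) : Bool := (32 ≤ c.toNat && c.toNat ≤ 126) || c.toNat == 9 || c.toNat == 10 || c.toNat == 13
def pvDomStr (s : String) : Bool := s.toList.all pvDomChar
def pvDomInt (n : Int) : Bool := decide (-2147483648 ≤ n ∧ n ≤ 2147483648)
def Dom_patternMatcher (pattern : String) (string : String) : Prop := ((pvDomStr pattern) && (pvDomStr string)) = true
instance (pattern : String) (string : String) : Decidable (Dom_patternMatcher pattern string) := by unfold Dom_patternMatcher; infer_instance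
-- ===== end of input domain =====

-- B screens every candidate (len_x, len_y) with precomputed rolling prefix-hash and power
-- tables — O(1) hash comparisons per pattern slot plus one exact confirmation when all the
-- hashes line up — instead of rebuilding the whole candidate string per candidate; the
-- one-letter case is decided by string repetition. Same results on every input.

-- ===== PORT A =====
def separartion (string : String) : List Char :=
  string.toList.foldl (fun array letter => array ++ [letter]) []

-- A's in-place flip loop: every index is rewritten exactly once from its old value → map (exact)
def pmFlipA (np : List Char) : List Char :=
  np.map (fun c => if c = 'x' then 'y' else 'x')

-- A's counting loop 'for idx in range(len(new_pattern))' reading new_pattern[idx]: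
-- ported as a fold over the index-annotated list (same elements, same order; exact)
def pmCountA (np : List Char) : Int × Int × Option Int :=
  np.zipIdx.foldl (fun st ci =>
    if ci.1 = 'x' then (st.1 + 1, st.2.1, st.2.2)
    else (st.1, st.2.1 + 1, if st.2.2 = none then some (ci.2 : Int) else st.2.2)) (0, 0, none)

-- A's block-comparison loop 'for i in range(1, count)' with early 'return []' → Bool helper
def pmBlocksA (s : List Char) (sub : List Char) (r : Int) : List Int → Bool
  | [] => true
  | i :: rest =>
      if sub ≠ PySem.List.slice s (some (i * r)) (some (i * r + r)) then false
      else pmBlocksA s sub r rest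

-- A's main loop 'for end in range(1, len(string))' with early return → recursion over the range
def pmLoopA (np : List Char) (s : List Char) (cx cy py : Int) (flag : Option Int) :
    List Int → List String
  | [] => []
  | e :: rest =>
      let x := PySem.List.slice s (some 0) (some e)
      let len_x : Int := x.length
      let len_y : Int :=
        if PySem.Int.mod ((s.length : Int) - len_x * cx) cy = 0 then
          PySem.Int.floordiv ((s.length : Int) - len_x * cx) cy
        else -1
      if len_y = -1 then pmLoopA np s cx cy py flag rest
      else
        let y := PySem.List.slice s (some (len_x * py)) (some (len_y + len_x * py))
        -- check_list: a copy of new_pattern with EVERY element overwritten by x or y → map (exact);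
        -- "".join(check_list) == string → flatten (exact: join with empty separator)
        if (np.map (fun c => if c = 'x' then x else y)).flatten = s then
          (if flag = none then [String.ofList x, String.ofList y] else [String.ofList y, String.ofList x])
        else pmLoopA np s cx cy py flag rest

def patternMatcher (pattern : String) (string : String) : List String :=
  if pattern = "" ∨ PySem.Str.len pattern > PySem.Str.len string then []
  else
    let np0 := separartion pattern
    -- new_pattern[0]: index 0 is in range here since pattern ≠ "" (pyGetD exact under the guard)
    let flag : Option Int := if PySem.List.pyGetD np0 0 ' ' ≠ 'x' then some 1 else none
    let np := if flag = some 1 then pmFlipA np0 else np0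
    let c := pmCountA np
    let count_x := c.1
    let count_y := c.2.1
    let position_y := c.2.2
    if count_x = 0 ∨ count_y = 0 then
      let count := if count_x ≠ 0 then count_x else count_y
      if PySem.Int.mod (PySem.Str.len string) count ≠ 0 then []
      else
        let substring_range := PySem.Int.floordiv (PySem.Str.len string) count
        let substring := PySem.List.slice string.toList (some 0) (some substring_range)
        if pmBlocksA string.toList substring substring_range (PySem.List.pyRange 1 count 1) then
          (if flag = none then [String.ofList substring, ""] else ["", String.ofList substring])
        else []
    else
      -- position_y is not None here (count_y ≠ 0), so the int it holds is used: .getD 0 (exact)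
      pmLoopA np string.toList count_x count_y (position_y.getD 0) flag
        (PySem.List.pyRange 1 (PySem.Str.len string) 1)

-- ===== PORT B =====
def pmMOD : Int := 2305843009213693951
def pmBASE : Int := 1000003

-- the h[i+1] = (h[i]*BASE + ord(c)) % MOD filling loop, carrying the previous cell
-- (ord(c) = c.toNat: the exact Unicode code point)
def pmBuildH : List Char → Int → List Int
  | [], _ => []
  | c :: t, hc =>
      let v := PySem.Int.mod (hc * pmBASE + (c.toNat : Int)) pmMOD
      v :: pmBuildH t v

-- the pw[i+1] = pw[i]*BASE % MOD filling loop
def pmBuildPw : Nat → Int → List Int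
  | 0, _ => []
  | k + 1, p =>
      let v := PySem.Int.mod (p * pmBASE) pmMOD
      v :: pmBuildPw k v

-- cut(i, j): hash of string[i:j] (indices used are always in range in B)
def pmCut (h pw : List Int) (i j : Int) : Int :=
  PySem.Int.mod (PySem.List.pyGetD h j 0 - PySem.List.pyGetD h i 0 * PySem.List.pyGetD pw (j - i) 0) pmMOD

-- the hash-screening walk 'for b in isx: … pos += L' with early break
def pmHashWalk (h pw : List Int) (lx ly hx hy : Int) : List Bool → Int → Bool
  | [], _ => true
  | b :: rest, pos =>
      let L := if b then lx else ly
      let hs := if b then hx else hy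
      if pmCut h pw pos (pos + L) ≠ hs then false
      else pmHashWalk h pw lx ly hx hy rest (pos + L)

-- the exact confirmation walk; string.startswith(seg, pos) with 0 ≤ pos is
-- 'startswith of the suffix at pos' (pos ≥ 0 always here)
def pmVerify (s x y : List Char) : List Bool → Int → Bool
  | [], _ => true
  | b :: rest, pos =>
      let seg := if b then x else y
      if ¬ PySem.Chars.startswith (PySem.List.slice s (some pos) none) seg then false
      else pmVerify s x y rest (pos + (seg.length : Int))

-- B's main loop 'for lx in range(1, n)' with early return → recursion over the range
def pmLoopB (s : List Char) (isx : List Bool) (h pw : List Int) (cx cy py : Int) (lead : Bool) :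
    List Int → List String
  | [] => []
  | lx :: rest =>
      let rem := (s.length : Int) - lx * cx
      if rem < 0 ∨ PySem.Int.mod rem cy ≠ 0 then pmLoopB s isx h pw cx cy py lead rest
      else
        let ly := PySem.Int.floordiv rem cy
        let p := lx * py
        let hx := pmCut h pw 0 lx
        let hy := pmCut h pw p (p + ly)
        if ¬ pmHashWalk h pw lx ly hx hy isx 0 then pmLoopB s isx h pw cx cy py lead rest
        else
          let x := PySem.List.slice s none (some lx)
          let y := PySem.List.slice s (some p) (some (p + ly))
          if ¬ pmVerify s x y isx 0 then pmLoopB s isx h pw cx cy py lead rest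
          else if lead then [String.ofList x, String.ofList y]
               else [String.ofList y, String.ofList x]

def patternMatcher_alt (pattern : String) (string : String) : List String :=
  let n : Int := PySem.Str.len string
  let m : Int := PySem.Str.len pattern
  if pattern = "" ∨ m > n then []
  else
    -- pattern[0]: in range since pattern ≠ ""
    let lead := PySem.List.pyGetD pattern.toList 0 ' ' == 'x'
    let isx := pattern.toList.map (fun c => (c == 'x') == lead)
    let cx : Int := (PySem.List.count isx true : Nat)
    let cy : Int := m - cx
    if cy = 0 then
      if PySem.Int.mod n cx ≠ 0 then []
      else
        let sub := PySem.List.slice string.toList none (some (PySem.Int.floordiv n cx))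
        if PySem.List.pyRepeat sub cx ≠ string.toList then []
        else if lead then [String.ofList sub, ""] else ["", String.ofList sub]
    else
      let h := 0 :: pmBuildH string.toList 0
      let pw := 1 :: pmBuildPw n.toNat 1
      -- isx.index(False): present since cy ≠ 0
      let py : Int := ((PySem.List.index? isx false).getD 0 : Nat)
      pmLoopB string.toList isx h pw cx cy py lead (PySem.List.pyRange 1 n 1)

-- ===== PRECONDITION & SPEC =====
def Spec_patternMatcher (pattern : String) (string : String) (out : List String) : Prop := out = patternMatcher_alt pattern string
instance (pattern : String) (string : String) (out : List String) : Decidable (Spec_patternMatcher pattern string out) := by unfold Spec_patternMatcher; infer_instance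

-- ===== CLAIM =====
def Claim_equal_patternMatcher : Prop := ∀ (pattern : String) (string : String), Dom_patternMatcher pattern string → Spec_patternMatcher pattern string (patternMatcher pattern string)

-- ===== LEMMAS AND PROOFS =====

lemma separartion_eq (s : String) : separartion s = s.toList := by
  simpa [separartion] using PySem.List.foldl_append_singleton_eq_self (l := s.toList) (acc := [])

lemma pmFlipA_mask (np : List Char) :
    (pmFlipA np).map (fun c => c == 'x') = (np.map (fun c => c == 'x')).map (fun b => !b) := by
  simp only [pmFlipA, List.map_map]
  refine List.map_congr_left ?_
  intro c _
  by_cases h : c = 'x' <;> simp [h]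

def pmFy (k : Nat) : List Char → Option Int
  | [] => none
  | c :: cs => if c = 'x' then pmFy (k + 1) cs else some (k : Int)

lemma pmCountA_aux (l : List Char) : ∀ (k : Nat) (a b : Int) (o : Option Int),
    (l.zipIdx k).foldl (fun st ci =>
        if ci.1 = 'x' then (st.1 + 1, st.2.1, st.2.2)
        else (st.1, st.2.1 + 1, if st.2.2 = none then some ((ci.2 : Nat) : Int) else st.2.2))
        (a, b, o)
      = (a + (l.countP (fun c => c == 'x') : Int), b + (l.countP (fun c => !(c == 'x')) : Int),
         match o with | some v => some v | none => pmFy k l) := by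
  induction l with
  | nil => intro k a b o; cases o <;> simp [pmFy]
  | cons c cs ih =>
      intro k a b o
      rw [List.zipIdx_cons, List.foldl_cons]
      by_cases h : c = 'x'
      · simp only [h, if_pos rfl, ih]
        cases o <;> simp [pmFy, List.countP_cons] <;> push_cast <;> ring_nf <;> simp [add_comm]
      · simp only [if_neg h, ih]
        cases o <;> simp [pmFy, h, List.countP_cons] <;> push_cast <;> ring_nf <;> simp [add_comm]

lemma pmFy_eq (l : List Char) : ∀ (k : Nat),
    pmFy k l = (List.idxOf? false (l.map (fun c => c == 'x'))).map (fun i => ((i + k : Nat) : Int)) := by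
  induction l with
  | nil => intro k; simp [pmFy, List.idxOf?]
  | cons c cs ih =>
      intro k
      by_cases h : c = 'x'
      · simp only [pmFy, h, if_pos rfl, List.map_cons, List.idxOf?, List.findIdx?_cons, ih,
          Option.map_map]
        simp only [reduceIte]
        cases List.findIdx? (fun x => x == false) (List.map (fun c => c == 'x') cs) with
        | none => rfl
        | some i =>
            rw [show (('x' == 'x') == false) = false from rfl, if_neg (by simp),
              Option.map_some]
            congr 1
            show ((i + (k + 1) : Nat) : Int) = ((i + 1 + k : Nat) : Int)
            omega
      · simp [pmFy, h, List.idxOf?, List.findIdx?_cons]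

lemma pmCountA_eq (np : List Char) :
    pmCountA np = ((np.countP (fun c => c == 'x') : Int),
                   (np.countP (fun c => !(c == 'x')) : Int),
                   (PySem.List.index? (np.map (fun c => c == 'x')) false).map (fun i => (i : Int))) := by
  rw [pmCountA, pmCountA_aux np 0 0 0 none]
  simp only [zero_add, pmFy_eq, PySem.List.index?]
  cases List.idxOf? false (List.map (fun c => c == 'x') np) <;> rfl

-- ---- the flattened substitution both programs compare against ----

def flatB (msk : List Bool) (x y : List Char) : List Char :=
  (msk.map (fun b => if b then x else y)).flatten

lemma join_eq_flatB (np : List Char) (x y : List Char) :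
    (np.map (fun c => if c = 'x' then x else y)).flatten
      = flatB (np.map (fun c => c == 'x')) x y := by
  simp only [flatB, List.map_map]
  congr 1
  refine List.map_congr_left ?_
  intro c _
  by_cases h : c = 'x' <;> simp [h]

lemma flatB_length (msk : List Bool) (x y : List Char) :
    (flatB msk x y).length = msk.countP id * x.length + msk.countP (fun b => !b) * y.length := by
  induction msk with
  | nil => simp [flatB]
  | cons b rest ih =>
      have h : flatB (b :: rest) x y = (if b then x else y) ++ flatB rest x y := by
        cases b <;> simp [flatB]
      rw [h, List.length_append, ih]
      cases b <;> simp [List.countP_cons] <;> ring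

-- ---- hash machinery ----

def pmGo (v : Int) (cs : List Char) : Int :=
  cs.foldl (fun a c => PySem.Int.mod (a * pmBASE + (c.toNat : Int)) pmMOD) v

def pmPw : Nat → Int
  | 0 => 1
  | k + 1 => PySem.Int.mod (pmPw k * pmBASE) pmMOD

lemma pmMOD_pos : (0 : Int) < pmMOD := by norm_num [pmMOD]

lemma pmGo_range (cs : List Char) : ∀ (v : Int), 0 ≤ v → v < pmMOD → 0 ≤ pmGo v cs ∧ pmGo v cs < pmMOD := by
  induction cs with
  | nil => intro v h1 h2; exact ⟨h1, h2⟩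
  | cons c t ih =>
      intro v _ _
      exact ih _ (PySem.Int.mod_nonneg _ pmMOD_pos) (PySem.Int.mod_lt _ pmMOD_pos)

lemma mod_modeq (a : Int) : PySem.Int.mod a pmMOD ≡ a [ZMOD pmMOD] := by
  rw [PySem.Int.mod_eq_emod_of_pos pmMOD_pos]
  exact Int.emod_emod_of_dvd a dvd_rfl

lemma pmGo_append (v : Int) (u w : List Char) : pmGo v (u ++ w) = pmGo (pmGo v u) w := by
  simp [pmGo, List.foldl_append]

lemma pmGo_shift (cs : List Char) : ∀ (v : Int),
    pmGo v cs ≡ v * pmBASE ^ cs.length + pmGo 0 cs [ZMOD pmMOD] := by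
  induction cs with
  | nil => intro v; simp [pmGo]
  | cons c t ih =>
      intro v
      show pmGo (PySem.Int.mod (v * pmBASE + (c.toNat : Int)) pmMOD) t ≡ _ [ZMOD pmMOD]
      have h1 : pmGo (PySem.Int.mod (v * pmBASE + (c.toNat : Int)) pmMOD) t
          ≡ (PySem.Int.mod (v * pmBASE + (c.toNat : Int)) pmMOD) * pmBASE ^ t.length
            + pmGo 0 t [ZMOD pmMOD] := ih _
      have h0 : pmGo 0 (c :: t) ≡ (c.toNat : Int) * pmBASE ^ t.length + pmGo 0 t [ZMOD pmMOD] := by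
        show pmGo (PySem.Int.mod (0 * pmBASE + (c.toNat : Int)) pmMOD) t ≡ _ [ZMOD pmMOD]
        refine (ih _).trans ?_
        refine Int.ModEq.add_right _ (Int.ModEq.mul_right _ ((mod_modeq _).trans ?_))
        rw [zero_mul, zero_add]
      have h2 : (PySem.Int.mod (v * pmBASE + (c.toNat : Int)) pmMOD) * pmBASE ^ t.length
          ≡ (v * pmBASE + (c.toNat : Int)) * pmBASE ^ t.length [ZMOD pmMOD] :=
        Int.ModEq.mul_right _ (mod_modeq _)
      refine h1.trans (h2.add_right _ |>.trans ?_)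
      have := (h0.symm.add_left ((v * pmBASE) * pmBASE ^ t.length))
      calc (v * pmBASE + (c.toNat : Int)) * pmBASE ^ t.length + pmGo 0 t
            = v * pmBASE ^ (t.length + 1) + ((c.toNat : Int) * pmBASE ^ t.length + pmGo 0 t) := by ring
        _ ≡ v * pmBASE ^ (t.length + 1) + pmGo 0 (c :: t) [ZMOD pmMOD] :=
              Int.ModEq.add_left _ h0.symm
        _ = v * pmBASE ^ (c :: t).length + pmGo 0 (c :: t) := by simp

lemma pmPw_modeq (k : Nat) : pmPw k ≡ pmBASE ^ k [ZMOD pmMOD] := by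
  induction k with
  | zero => simp [pmPw]
  | succ k ih =>
      show PySem.Int.mod (pmPw k * pmBASE) pmMOD ≡ _ [ZMOD pmMOD]
      refine (mod_modeq _).trans ?_
      calc pmPw k * pmBASE ≡ pmBASE ^ k * pmBASE [ZMOD pmMOD] := Int.ModEq.mul_right _ ih
        _ = pmBASE ^ (k + 1) := by ring

lemma buildH_getD (cs : List Char) : ∀ (v : Int) (k : Nat), k ≤ cs.length →
    (v :: pmBuildH cs v).getD k 0 = pmGo v (cs.take k) := by
  induction cs with
  | nil =>
      intro v k hk
      have : k = 0 := Nat.le_zero.mp hk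
      subst this
      simp [pmGo]
  | cons c t ih =>
      intro v k hk
      cases k with
      | zero => simp [pmGo]
      | succ k =>
          show (pmBuildH (c :: t) v).getD k 0 = _
          simp only [pmBuildH]
          rw [show ((PySem.Int.mod (v * pmBASE + (c.toNat : Int)) pmMOD) :: pmBuildH t _).getD k 0
              = pmGo (PySem.Int.mod (v * pmBASE + (c.toNat : Int)) pmMOD) (t.take k) from
            ih _ k (by simpa using hk)]
          rfl

lemma buildPw_getD : ∀ (nn : Nat) (j k : Nat), k ≤ nn →
    (pmPw j :: pmBuildPw nn (pmPw j)).getD k 0 = pmPw (j + k) := by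
  intro nn
  induction nn with
  | zero =>
      intro j k hk
      have : k = 0 := Nat.le_zero.mp hk
      subst this
      simp
  | succ nn ih =>
      intro j k hk
      cases k with
      | zero => simp
      | succ k =>
          show (pmBuildPw (nn + 1) (pmPw j)).getD k 0 = _
          simp only [pmBuildPw]
          rw [show PySem.Int.mod (pmPw j * pmBASE) pmMOD = pmPw (j + 1) from rfl]
          rw [ih (j + 1) k (by omega)]
          congr 1
          omega

lemma pmCut_eq (cs : List Char) (i j : Nat) (hij : i ≤ j) (hj : j ≤ cs.length) :
    pmCut (0 :: pmBuildH cs 0) (1 :: pmBuildPw cs.length 1) (i : Int) (j : Int)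
      = pmGo 0 ((cs.take j).drop i) := by
  have hgj : PySem.List.pyGetD (0 :: pmBuildH cs 0) (j : Int) 0 = pmGo 0 (cs.take j) := by
    rw [PySem.List.pyGetD_natCast]
    exact buildH_getD cs 0 j hj
  have hgi : PySem.List.pyGetD (0 :: pmBuildH cs 0) (i : Int) 0 = pmGo 0 (cs.take i) := by
    rw [PySem.List.pyGetD_natCast]
    exact buildH_getD cs 0 i (le_trans hij hj)
  have hcast : (j : Int) - (i : Int) = ((j - i : Nat) : Int) := by omega
  have hgp : PySem.List.pyGetD (1 :: pmBuildPw cs.length 1) ((j : Int) - (i : Int)) 0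
      = pmPw (j - i) := by
    rw [hcast, PySem.List.pyGetD_natCast]
    have := buildPw_getD cs.length 0 (j - i) (by omega)
    simpa [pmPw] using this
  set seg := (cs.take j).drop i with hseg
  have hsplit : cs.take j = cs.take i ++ seg := by
    rw [hseg]
    conv_lhs => rw [← List.take_append_drop i (cs.take j)]
    congr 1
    rw [List.take_take, min_eq_left hij]
  have hlseg : seg.length = j - i := by
    rw [hseg, List.length_drop, List.length_take]
    omega
  have hmod : pmGo 0 (cs.take j) - pmGo 0 (cs.take i) * pmPw (j - i) ≡ pmGo 0 seg [ZMOD pmMOD] := by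
    have h1 : pmGo 0 (cs.take j) = pmGo (pmGo 0 (cs.take i)) seg := by
      rw [hsplit, pmGo_append]
    have h2 : pmGo (pmGo 0 (cs.take i)) seg
        ≡ pmGo 0 (cs.take i) * pmBASE ^ seg.length + pmGo 0 seg [ZMOD pmMOD] := pmGo_shift _ _
    have h3 : pmGo 0 (cs.take i) * pmPw (j - i)
        ≡ pmGo 0 (cs.take i) * pmBASE ^ seg.length [ZMOD pmMOD] := by
      rw [hlseg]
      exact Int.ModEq.mul_left _ (pmPw_modeq _)
    calc pmGo 0 (cs.take j) - pmGo 0 (cs.take i) * pmPw (j - i)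
        ≡ (pmGo 0 (cs.take i) * pmBASE ^ seg.length + pmGo 0 seg)
            - pmGo 0 (cs.take i) * pmBASE ^ seg.length [ZMOD pmMOD] := by
          rw [h1]; exact Int.ModEq.sub h2 h3
      _ = pmGo 0 seg := by ring
  have hrange := pmGo_range seg 0 le_rfl pmMOD_pos
  rw [pmCut, hgj, hgi, hgp, PySem.Int.mod_eq_emod_of_pos pmMOD_pos]
  rw [Int.ModEq] at hmod
  rw [hmod, Int.emod_eq_of_lt hrange.1 hrange.2]

lemma pmCut_eq' (cs : List Char) (i j : Int) (hi : 0 ≤ i) (hij : i ≤ j) (hj : j ≤ (cs.length : Int)) :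
    pmCut (0 :: pmBuildH cs 0) (1 :: pmBuildPw cs.length 1) i j
      = pmGo 0 ((cs.take j.toNat).drop i.toNat) := by
  have h1 : i = ((i.toNat : Nat) : Int) := by omega
  have h2 : j = ((j.toNat : Nat) : Int) := by omega
  conv_lhs => rw [h1, h2]
  rw [pmCut_eq cs i.toNat j.toNat (by omega) (by omega)]

-- ---- the two walks ----

lemma drop_take_prefix (cs u : List Char) (pos : Nat) (h : u <+: cs.drop pos) :
    (cs.take (pos + u.length)).drop pos = u := by
  obtain ⟨t, ht⟩ := h
  rw [List.drop_take]
  have : (cs.drop pos).take u.length = u := by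
    rw [← ht]; exact List.take_left' rfl
  simpa [Nat.add_sub_cancel_left] using this

lemma hashwalk_pass (cs x y : List Char) :
    ∀ (msk : List Bool) (pos : Nat),
      pos + (flatB msk x y).length ≤ cs.length →
      flatB msk x y <+: cs.drop pos →
      pmHashWalk (0 :: pmBuildH cs 0) (1 :: pmBuildPw cs.length 1)
        (x.length : Int) (y.length : Int) (pmGo 0 x) (pmGo 0 y) msk (pos : Int) = true := by
  intro msk
  induction msk with
  | nil => intro pos _ _; rfl
  | cons b rest ih =>
      intro pos hlen hpre
      have hflat : flatB (b :: rest) x y = (if b then x else y) ++ flatB rest x y := by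
        cases b <;> simp [flatB]
      set seg := (if b then x else y) with hsegdef
      have hsegpre : seg <+: cs.drop pos := by
        obtain ⟨t, ht⟩ := hpre
        rw [hflat] at ht
        exact ⟨flatB rest x y ++ t, by rw [← List.append_assoc]; exact ht⟩
      have hposb : pos + seg.length ≤ cs.length := by
        have : seg.length ≤ (flatB (b :: rest) x y).length := by
          rw [hflat, List.length_append]
          exact Nat.le_add_right _ _
        omega
      have hcut : pmCut (0 :: pmBuildH cs 0) (1 :: pmBuildPw cs.length 1)
          (pos : Int) ((pos : Int) + (seg.length : Int)) = pmGo 0 seg := by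
        rw [show (pos : Int) + (seg.length : Int) = ((pos + seg.length : Nat) : Int) by push_cast; ring]
        rw [pmCut_eq cs pos (pos + seg.length) (by omega) hposb]
        rw [drop_take_prefix cs seg pos hsegpre]
      have hL : (if b then (x.length : Int) else (y.length : Int)) = (seg.length : Int) := by
        cases b <;> simp [hsegdef]
      have hhs : (if b then pmGo 0 x else pmGo 0 y) = pmGo 0 seg := by
        cases b <;> simp [hsegdef]
      show pmHashWalk _ _ _ _ _ _ (b :: rest) (pos : Int) = true
      simp only [pmHashWalk, hL, hhs, hcut]
      rw [if_neg (by simp)]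
      rw [show (pos : Int) + (seg.length : Int) = ((pos + seg.length : Nat) : Int) by push_cast; ring]
      refine ih (pos + seg.length) ?_ ?_
      · rw [hflat] at hlen; simp at hlen; omega
      · obtain ⟨t, ht⟩ := hpre
        rw [hflat, List.append_assoc] at ht
        refine ⟨t, ?_⟩
        have hdd : cs.drop (pos + seg.length) = (cs.drop pos).drop seg.length := by
          rw [List.drop_drop]
        rw [hdd, ← ht, List.drop_left]

lemma pmVerify_iff (cs x y : List Char) :
    ∀ (msk : List Bool) (pos : Nat),
      pmVerify cs x y msk (pos : Int) = true ↔ flatB msk x y <+: cs.drop pos := by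
  intro msk
  induction msk with
  | nil =>
      intro pos
      simp [pmVerify, flatB]
  | cons b rest ih =>
      intro pos
      have hflat : flatB (b :: rest) x y = (if b then x else y) ++ flatB rest x y := by
        cases b <;> simp [flatB]
      set seg := (if b then x else y) with hsegdef
      show pmVerify cs x y (b :: rest) (pos : Int) = true ↔ _
      rw [pmVerify, hflat]
      rw [PySem.List.slice_from_natCast]
      by_cases hsw : PySem.Chars.startswith (cs.drop pos) seg = true
      · obtain ⟨t, ht⟩ := (PySem.Chars.startswith_iff _ _).mp hsw
        rw [if_neg (by rw [← hsegdef]; simp [hsw])]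
        rw [show (pos : Int) + (seg.length : Int) = ((pos + seg.length : Nat) : Int) by push_cast; ring]
        rw [ih (pos + seg.length)]
        have hdd : cs.drop (pos + seg.length) = t := by
          have h1 : cs.drop (pos + seg.length) = (cs.drop pos).drop seg.length := by
            rw [List.drop_drop]
          rw [h1, ← ht, List.drop_left]
        rw [hdd]
        constructor
        · intro ⟨u, hu⟩
          exact ⟨u, by rw [← ht, ← hu, List.append_assoc]⟩
        · intro ⟨u, hu⟩
          refine ⟨u, ?_⟩
          have : seg ++ (flatB rest x y ++ u) = seg ++ t := by
            rw [← List.append_assoc, hu, ht]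
          exact List.append_cancel_left this
      · rw [if_pos (by simpa using hsw)]
        constructor
        · intro h; exact absurd h (by simp)
        · intro ⟨u, hu⟩
          exact absurd ((PySem.Chars.startswith_iff _ _).mpr
            ⟨flatB rest x y ++ u, by rw [← hu, List.append_assoc]⟩) hsw

lemma hashwalk_pass0 (cs x y : List Char) (msk : List Bool)
    (hlen : (flatB msk x y).length ≤ cs.length) (hpre : flatB msk x y <+: cs) :
    pmHashWalk (0 :: pmBuildH cs 0) (1 :: pmBuildPw cs.length 1)
      (x.length : Int) (y.length : Int) (pmGo 0 x) (pmGo 0 y) msk 0 = true := by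
  have := hashwalk_pass cs x y msk 0 (by simpa using hlen) (by simpa using hpre)
  simpa using this

lemma pmVerify_iff0 (cs x y : List Char) (msk : List Bool) :
    pmVerify cs x y msk 0 = true ↔ flatB msk x y <+: cs := by
  have := pmVerify_iff cs x y msk 0
  simpa using this

-- ---- lemmas reused for the one-letter branch (block comparison ↔ repetition) ----

lemma rep_iff (k : Nat) (c : Nat) : ∀ (s sub : List Char), s.length = c * k →
    sub.length = k →
    ((∀ i < c, (s.drop (i * k)).take k = sub) ↔ s = (List.replicate c sub).flatten) := by
  induction c with
  | zero =>
      intro s sub hs _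
      simp only [Nat.zero_mul, List.length_eq_zero_iff.mp (by simpa using hs)]
      simp
  | succ c ih =>
      intro s sub hs hsub
      have hk : k ≤ s.length := by rw [hs, Nat.succ_mul]; omega
      have hdrop : (s.drop k).length = c * k := by
        rw [List.length_drop, hs, Nat.succ_mul]; omega
      have hshift : ∀ i : Nat, s.drop ((i + 1) * k) = (s.drop k).drop (i * k) := by
        intro i; rw [List.drop_drop]; congr 1; ring
      rw [List.replicate_succ, List.flatten_cons]
      constructor
      · intro h
        have h0 : s.take k = sub := by simpa using h 0 (Nat.succ_pos c)
        have hrest : s.drop k = (List.replicate c sub).flatten := by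
          rw [← ih (s.drop k) sub hdrop hsub]
          intro i hi
          rw [← hshift i]
          exact h (i + 1) (by omega)
        calc s = s.take k ++ s.drop k := (List.take_append_drop k s).symm
          _ = sub ++ (List.replicate c sub).flatten := by rw [h0, hrest]
      · intro h i hi
        have htake : s.take k = sub := by rw [h]; exact List.take_left' hsub
        have hdropk : s.drop k = (List.replicate c sub).flatten := by
          rw [h]; exact List.drop_left' hsub
        cases i with
        | zero => simpa using htake
        | succ j =>
            rw [hshift j]
            exact (ih (s.drop k) sub hdrop hsub).mpr hdropk j (by omega)

lemma pmBlocksA_iff (s sub : List Char) (r : Int) (l : List Int) :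
    pmBlocksA s sub r l = true ↔
      ∀ i ∈ l, sub = PySem.List.slice s (some (i * r)) (some (i * r + r)) := by
  induction l with
  | nil => simp [pmBlocksA]
  | cons i rest ih =>
      simp only [pmBlocksA, List.forall_mem_cons, ← ih]
      by_cases h : sub = PySem.List.slice s (some (i * r)) (some (i * r + r)) <;> simp [h]

lemma map_getD_py (o : Option Nat) :
    (Option.map (fun i => (i : Int)) o).getD 0 = ((o.getD 0 : Nat) : Int) := by
  cases o <;> simp

lemma countP_id_map (np : List Char) :
    (np.map (fun c => c == 'x')).countP id = np.countP (fun c => c == 'x') := by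
  rw [List.countP_map]; rfl

lemma countP_not_map (np : List Char) :
    (np.map (fun c => c == 'x')).countP (fun b => !b) = np.countP (fun c => !(c == 'x')) := by
  rw [List.countP_map]; rfl

lemma countP_not_eq (np : List Char) :
    (np.countP (fun c => !(c == 'x')) : Int)
      = (np.length : Int) - (np.countP (fun c => c == 'x') : Int) := by
  have h1 : np.countP (fun c => !(c == 'x')) = np.countP (fun a => decide ¬((a == 'x') = true)) := by
    refine List.countP_congr ?_
    intro a _
    simp
  have h2 := List.length_eq_countP_add_countP (p := fun c => (c == 'x')) (l := np)
  rw [h1]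
  omega

lemma single_branch_eq (s : List Char) (cnt : Int) (hcnt : 0 < cnt)
    (hmod : PySem.Int.mod (s.length : Int) cnt = 0) :
    (pmBlocksA s (PySem.List.slice s (some 0) (some (PySem.Int.floordiv (s.length : Int) cnt)))
        (PySem.Int.floordiv (s.length : Int) cnt) (PySem.List.pyRange 1 cnt 1) = true)
      ↔ (PySem.List.pyRepeat
          (PySem.List.slice s (some 0) (some (PySem.Int.floordiv (s.length : Int) cnt))) cnt
          = s) := by
  have hq0 : 0 ≤ PySem.Int.floordiv (s.length : Int) cnt := by
    rw [PySem.Int.floordiv_eq_ediv_of_pos hcnt]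
    exact Int.ediv_nonneg (by omega) (le_of_lt hcnt)
  set q := PySem.Int.floordiv (s.length : Int) cnt with hqdef
  have hnq : (s.length : Int) = cnt * q := by
    rw [hqdef, PySem.Int.floordiv_eq_ediv_of_pos hcnt]
    exact (Int.mul_ediv_cancel' ((PySem.Int.mod_eq_zero_iff_dvd _ _).mp hmod)).symm
  have hslen : s.length = cnt.toNat * q.toNat := by
    have h' : ((cnt.toNat * q.toNat : Nat) : Int) = (s.length : Int) := by
      push_cast
      rw [Int.toNat_of_nonneg (le_of_lt hcnt), Int.toNat_of_nonneg hq0, ← hnq]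
    exact_mod_cast h'.symm
  have hsub : PySem.List.slice s (some 0) (some q) = s.take q.toNat := by
    rw [PySem.List.slice_toNat s le_rfl hq0]; simp
  have hk : q.toNat ≤ s.length := by
    rw [hslen]
    exact Nat.le_mul_of_pos_left _ (by omega)
  have hsublen : (s.take q.toNat).length = q.toNat := by simp [List.length_take]; omega
  have hrep := rep_iff q.toNat cnt.toNat s (s.take q.toNat) hslen hsublen
  have hsliceNat : ∀ j : Nat, PySem.List.slice s (some ((j : Int) * q)) (some ((j : Int) * q + q))
      = (s.drop (j * q.toNat)).take q.toNat := by
    intro j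
    rw [show (j : Int) * q = ((j * q.toNat : Nat) : Int) by
          push_cast; rw [Int.toNat_of_nonneg hq0],
        show q = ((q.toNat : Nat) : Int) by omega,
        PySem.List.slice_natCast_add]
    simp
    omega
  rw [hsub, pmBlocksA_iff, PySem.List.pyRepeat]
  constructor
  · intro h
    refine (hrep.mp ?_).symm
    intro j hj
    cases j with
    | zero => simp
    | succ i =>
        have hmem : ((i + 1 : Nat) : Int) ∈ PySem.List.pyRange 1 cnt 1 := by
          rw [PySem.List.mem_pyRange_one]
          constructor
          · push_cast; omega
          · omega
        have := h _ hmem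
        rw [hsliceNat (i + 1)] at this
        exact this.symm
  · intro h i hi
    rw [PySem.List.mem_pyRange_one] at hi
    have hi0 : 0 ≤ i := by omega
    have hieq : i = ((i.toNat : Nat) : Int) := by omega
    rw [hieq, hsliceNat i.toNat]
    exact (hrep.mpr h.symm i.toNat (by omega)).symm

-- ---- the first 'false' position of the mask ----

lemma index?_false_split (msk : List Bool) (p : Nat)
    (hp : PySem.List.index? msk false = some p) :
    ∃ tail, msk = List.replicate p true ++ false :: tail := by
  rw [PySem.List.index?_eq_some_iff] at hp
  obtain ⟨pre, suf, hmsk, hlen, hpre⟩ := hp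
  refine ⟨suf, ?_⟩
  rw [hmsk]
  congr 1
  rw [List.eq_replicate_iff]
  refine ⟨hlen, fun b hb => ?_⟩
  cases b with
  | false => exact absurd hb hpre
  | true => rfl

lemma py_le_countP (msk : List Bool) (p : Nat) (tail : List Bool)
    (h : msk = List.replicate p true ++ false :: tail) : p ≤ msk.countP id := by
  rw [h, List.countP_append]
  have : ∀ q : Nat, (List.replicate q true).countP id = q := by
    intro q
    induction q with
    | zero => rfl
    | succ q ih => simp [List.replicate_succ, List.countP_cons, ih]
  have h2 := this p
  omega

-- ---- the main loop: A's rebuild-and-compare vs B's hash screen + confirm ----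

lemma pmLoop_eq (np : List Char) (s : List Char) (cx cy py : Int) (lead : Bool)
    (hcx : cx = (np.countP (fun c => c == 'x') : Int))
    (hcy : cy = (np.countP (fun c => !(c == 'x')) : Int))
    (hcx1 : 0 < cx) (hcy1 : 0 < cy)
    (py0 : Nat)
    (hpy : PySem.List.index? (np.map (fun c => c == 'x')) false = some py0)
    (hpyv : py = (py0 : Int)) :
    ∀ (l : List Int), (∀ e ∈ l, 0 ≤ e ∧ e < (s.length : Int)) →
      pmLoopA np s cx cy py (if lead then none else some 1) l
        = pmLoopB s (np.map (fun c => c == 'x')) (0 :: pmBuildH s 0)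
            (1 :: pmBuildPw (s.length : Int).toNat 1) cx cy py lead l := by
  set msk := np.map (fun c => c == 'x') with hmskdef
  have hcount_id : msk.countP id = np.countP (fun c => c == 'x') := countP_id_map np
  obtain ⟨tail, hsplit⟩ := index?_false_split msk py0 hpy
  have hpycx : (py0 : Int) ≤ cx := by
    rw [hcx, ← hcount_id]
    exact_mod_cast py_le_countP msk py0 tail hsplit
  have hpwn : (1 :: pmBuildPw (s.length : Int).toNat 1) = 1 :: pmBuildPw s.length 1 := by
    simp
  intro l
  induction l with
  | nil => intro _; rfl
  | cons e rest ih =>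
      intro hl
      obtain ⟨he0, helt⟩ := hl e (List.mem_cons_self)
      have hrest := fun a ha => hl a (List.mem_cons_of_mem _ ha)
      have hxeq : PySem.List.slice s (some 0) (some e) = s.take e.toNat := by
        rw [PySem.List.slice_toNat s le_rfl he0]; simp
      have hlenx : (((s.take e.toNat).length : Nat) : Int) = e := by
        simp [List.length_take]; omega
      simp only [pmLoopA, pmLoopB, hxeq, hlenx, hpwn]
      by_cases hm : PySem.Int.mod ((s.length : Int) - e * cx) cy = 0
      · by_cases hneg : (s.length : Int) - e * cx < 0
        · -- negative remainder: B skips up front; A's candidate is too long to match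
          rw [if_pos (Or.inl hneg), if_pos hm]
          have hlyneg : PySem.Int.floordiv ((s.length : Int) - e * cx) cy < 0 := by
            rw [PySem.Int.floordiv_eq_ediv_of_pos hcy1]
            exact Int.ediv_neg_of_neg_of_pos hneg hcy1
          by_cases hly : PySem.Int.floordiv ((s.length : Int) - e * cx) cy = -1
          · rw [if_pos hly]; exact ih hrest
          · rw [if_neg hly]
            have hne : (np.map (fun c => if c = 'x' then s.take e.toNat
                else PySem.List.slice s (some (e * py))
                  (some (PySem.Int.floordiv ((s.length : Int) - e * cx) cy + e * py)))).flatten ≠ s := by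
              intro hcontr
              rw [join_eq_flatB] at hcontr
              have hlen := congrArg List.length hcontr
              rw [flatB_length, hcount_id] at hlen
              have hE : ((e.toNat : Nat) : Int) = e := by omega
              have hsl : s.length < e.toNat * np.countP (fun c => c == 'x') := by
                have : (s.length : Int) < (e.toNat : Int) * (np.countP (fun c => c == 'x') : Int) := by
                  rw [hE]; rw [hcx] at hneg; omega
                exact_mod_cast this
              have htk : (s.take e.toNat).length = e.toNat := by
                simp [List.length_take]; omega
              rw [htk] at hlen
              have : np.countP (fun c => c == 'x') * e.toNat ≤ s.length := by
                rw [← hlen]; exact Nat.le_add_right _ _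
              rw [Nat.mul_comm] at this
              omega
            rw [if_neg hne]
            exact ih hrest
        · -- nonnegative, divisible remainder: both examine the same candidate
          push_neg at hneg
          have hBgo : ¬((s.length : Int) - e * cx < 0
              ∨ PySem.Int.mod ((s.length : Int) - e * cx) cy ≠ 0) :=
            not_or.mpr ⟨not_lt.mpr hneg, not_not_intro hm⟩
          rw [if_neg hBgo, if_pos hm]
          set ly := PySem.Int.floordiv ((s.length : Int) - e * cx) cy with hlydef
          have hly0 : 0 ≤ ly := by
            rw [hlydef, PySem.Int.floordiv_eq_ediv_of_pos hcy1]
            exact Int.ediv_nonneg (by omega) (le_of_lt hcy1)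
          rw [if_neg (by omega : ¬ ly = -1)]
          have hrem : cy * ly = (s.length : Int) - e * cx := by
            rw [hlydef, PySem.Int.floordiv_eq_ediv_of_pos hcy1]
            exact Int.mul_ediv_cancel' ((PySem.Int.mod_eq_zero_iff_dvd _ _).mp hm)
          have hpn : e * py + ly ≤ (s.length : Int) := by
            have h1 : e * py ≤ e * cx := by
              rw [hpyv]
              exact mul_le_mul_of_nonneg_left hpycx he0
            have h2 : ly ≤ cy * ly := le_mul_of_one_le_left hly0 hcy1
            omega
          rw [show ly + e * py = e * py + ly from by ring]
          -- the shared slice names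
          have hpcast : e * py = ((e.toNat * py0 : Nat) : Int) := by
            rw [hpyv]; push_cast; rw [Int.toNat_of_nonneg he0]
          have hycast : ly = ((ly.toNat : Nat) : Int) := by omega
          set x := s.take e.toNat with hxdef
          have hyeq : PySem.List.slice s (some (e * py)) (some (e * py + ly))
              = (s.drop (e.toNat * py0)).take ly.toNat := by
            rw [hpcast, hycast, PySem.List.slice_natCast_add]
            simp
            omega
          set Y := (s.drop (e.toNat * py0)).take ly.toNat with hYdef
          have hpnN : e.toNat * py0 + ly.toNat ≤ s.length := by
            have := hpn
            rw [hpcast, hycast] at this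
            exact_mod_cast this
          have hYlen : Y.length = ly.toNat := by
            rw [hYdef, List.length_take, List.length_drop]
            omega
          have hxlen : x.length = e.toNat := by
            rw [hxdef, List.length_take]
            omega
          have hflen : (flatB msk x Y).length = s.length := by
            rw [flatB_length, hcount_id, hmskdef, countP_not_map, hxlen, hYlen]
            have : ((np.countP (fun c => c == 'x') * e.toNat
                + np.countP (fun c => !(c == 'x')) * ly.toNat : Nat) : Int) = (s.length : Int) := by
              push_cast
              rw [show ((e.toNat : Nat) : Int) = e from by omega,
                  show ((ly.toNat : Nat) : Int) = ly from by omega]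
              rw [← hcx, ← hcy, hrem]
              ring
            exact_mod_cast this
          -- B's hash values are the content hashes of x and Y
          have hhx : pmCut (0 :: pmBuildH s 0) (1 :: pmBuildPw s.length 1) 0 e = pmGo 0 x := by
            rw [pmCut_eq' s 0 e le_rfl he0 (by omega)]
            simp [hxdef]
          have hhy : pmCut (0 :: pmBuildH s 0) (1 :: pmBuildPw s.length 1) (e * py) (e * py + ly)
              = pmGo 0 Y := by
            have hp0 : 0 ≤ e * py := by
              rw [hpyv]; positivity
            rw [pmCut_eq' s (e * py) (e * py + ly) hp0 (by omega) (by omega)]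
            rw [hYdef]
            have ht1 : (e * py).toNat = e.toNat * py0 := by
              rw [hpcast, Int.toNat_natCast]
            rw [List.drop_take, ht1]
            congr 1
            rw [Int.toNat_add hp0 hly0, ht1, Nat.add_sub_cancel_left]
          have hxslice : PySem.List.slice s none (some e) = x := by
            rw [PySem.List.slice_to s he0, hxdef]
          have hverify_iff : pmVerify s x Y msk 0 = true ↔ flatB msk x Y = s := by
            rw [pmVerify_iff0]
            constructor
            · intro hp
              exact List.IsPrefix.eq_of_length hp (by rw [hflen])
            · intro hp
              rw [hp]
          by_cases hj : (np.map (fun c => if c = 'x' then x else Y)).flatten = s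
          · -- the candidate matches: A returns; B's hash screen and confirmation both pass
            have hjB : flatB msk x Y = s := by rw [← join_eq_flatB, hj]
            have hwalk : pmHashWalk (0 :: pmBuildH s 0) (1 :: pmBuildPw s.length 1) e ly
                (pmCut (0 :: pmBuildH s 0) (1 :: pmBuildPw s.length 1) 0 e)
                (pmCut (0 :: pmBuildH s 0) (1 :: pmBuildPw s.length 1) (e * py) (e * py + ly))
                msk 0 = true := by
              rw [hhx, hhy,
                  show e = ((x.length : Nat) : Int) from by rw [hxlen]; omega,
                  show ly = ((Y.length : Nat) : Int) from by rw [hYlen]; omega]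
              exact hashwalk_pass0 s x Y msk (by rw [hflen]) (by rw [hjB])
            have hver : pmVerify s x Y msk 0 = true := hverify_iff.mpr hjB
            rw [hxslice, hyeq, if_pos hj,
                if_neg (show ¬¬(pmHashWalk (0 :: pmBuildH s 0) (1 :: pmBuildPw s.length 1) e ly
                  (pmCut (0 :: pmBuildH s 0) (1 :: pmBuildPw s.length 1) 0 e)
                  (pmCut (0 :: pmBuildH s 0) (1 :: pmBuildPw s.length 1) (e * py) (e * py + ly))
                  msk 0 = true) from by simp [hwalk]),
                if_neg (show ¬¬(pmVerify s x Y msk 0 = true) from by simp [hver])]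
            cases lead <;> simp
          · -- no match: A moves on; B cannot pass both phases
            rw [hxslice, hyeq, if_neg hj]
            by_cases hw : pmHashWalk (0 :: pmBuildH s 0) (1 :: pmBuildPw s.length 1) e ly
                (pmCut (0 :: pmBuildH s 0) (1 :: pmBuildPw s.length 1) 0 e)
                (pmCut (0 :: pmBuildH s 0) (1 :: pmBuildPw s.length 1) (e * py) (e * py + ly))
                msk 0 = true
            · have hver : ¬(pmVerify s x Y msk 0 = true) := by
                intro hvt
                exact hj (by rw [← join_eq_flatB] at *; exact hverify_iff.mp hvt)
              rw [if_neg (show ¬¬(pmHashWalk (0 :: pmBuildH s 0) (1 :: pmBuildPw s.length 1) e ly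
                    (pmCut (0 :: pmBuildH s 0) (1 :: pmBuildPw s.length 1) 0 e)
                    (pmCut (0 :: pmBuildH s 0) (1 :: pmBuildPw s.length 1) (e * py) (e * py + ly))
                    msk 0 = true) from by simp [hw]),
                  if_pos hver]
              exact ih hrest
            · rw [if_pos hw]
              exact ih hrest
      · -- remainder not divisible: both skip
        rw [if_pos (Or.inr hm), if_neg hm, if_pos rfl]
        exact ih hrest

-- ---- the common core after the guard and the normalisation ----

lemma count_true_eq (msk : List Bool) : (PySem.List.count msk true : Nat) = msk.countP id := by
  rw [PySem.List.count_eq]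
  rw [List.count]
  refine List.countP_congr ?_
  intro b _
  cases b <;> simp

lemma core_eq (np : List Char) (s : List Char) (lead : Bool) (tl : List Char)
    (hnp : np = 'x' :: tl) :
    (if ((np.countP (fun c => c == 'x') : Nat) : Int) = 0
        ∨ ((np.countP (fun c => !(c == 'x')) : Nat) : Int) = 0 then
      (if PySem.Int.mod (s.length : Int)
            (if ((np.countP (fun c => c == 'x') : Nat) : Int) ≠ 0
             then ((np.countP (fun c => c == 'x') : Nat) : Int)
             else ((np.countP (fun c => !(c == 'x')) : Nat) : Int)) ≠ 0 then []
       else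
        (if pmBlocksA s
              (PySem.List.slice s (some 0) (some (PySem.Int.floordiv (s.length : Int)
                (if ((np.countP (fun c => c == 'x') : Nat) : Int) ≠ 0
                 then ((np.countP (fun c => c == 'x') : Nat) : Int)
                 else ((np.countP (fun c => !(c == 'x')) : Nat) : Int)))))
              (PySem.Int.floordiv (s.length : Int)
                (if ((np.countP (fun c => c == 'x') : Nat) : Int) ≠ 0
                 then ((np.countP (fun c => c == 'x') : Nat) : Int)
                 else ((np.countP (fun c => !(c == 'x')) : Nat) : Int)))
              (PySem.List.pyRange 1
                (if ((np.countP (fun c => c == 'x') : Nat) : Int) ≠ 0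
                 then ((np.countP (fun c => c == 'x') : Nat) : Int)
                 else ((np.countP (fun c => !(c == 'x')) : Nat) : Int)) 1) = true then
          (if (if lead then (none : Option Int) else some 1) = none then
            [String.ofList (PySem.List.slice s (some 0) (some (PySem.Int.floordiv (s.length : Int)
                (if ((np.countP (fun c => c == 'x') : Nat) : Int) ≠ 0
                 then ((np.countP (fun c => c == 'x') : Nat) : Int)
                 else ((np.countP (fun c => !(c == 'x')) : Nat) : Int))))), ""]
           else
            ["", String.ofList (PySem.List.slice s (some 0) (some (PySem.Int.floordiv (s.length : Int)
                (if ((np.countP (fun c => c == 'x') : Nat) : Int) ≠ 0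
                 then ((np.countP (fun c => c == 'x') : Nat) : Int)
                 else ((np.countP (fun c => !(c == 'x')) : Nat) : Int)))))])
         else []))
     else
      pmLoopA np s ((np.countP (fun c => c == 'x') : Nat) : Int)
        ((np.countP (fun c => !(c == 'x')) : Nat) : Int)
        (((PySem.List.index? (np.map (fun c => c == 'x')) false).map (fun i => (i : Int))).getD 0)
        (if lead then none else some 1)
        (PySem.List.pyRange 1 (s.length : Int) 1))
    =
    (if (np.length : Int) - ((PySem.List.count (np.map (fun c => c == 'x')) true : Nat) : Int) = 0 then
      (if PySem.Int.mod (s.length : Int)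
            ((PySem.List.count (np.map (fun c => c == 'x')) true : Nat) : Int) ≠ 0 then []
       else
        (if PySem.List.pyRepeat
              (PySem.List.slice s none (some (PySem.Int.floordiv (s.length : Int)
                ((PySem.List.count (np.map (fun c => c == 'x')) true : Nat) : Int))))
              ((PySem.List.count (np.map (fun c => c == 'x')) true : Nat) : Int) ≠ s then []
         else
          (if lead then
            [String.ofList (PySem.List.slice s none (some (PySem.Int.floordiv (s.length : Int)
                ((PySem.List.count (np.map (fun c => c == 'x')) true : Nat) : Int)))), ""]
           else
            ["", String.ofList (PySem.List.slice s none (some (PySem.Int.floordiv (s.length : Int)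
                ((PySem.List.count (np.map (fun c => c == 'x')) true : Nat) : Int))))])))
     else
      pmLoopB s (np.map (fun c => c == 'x')) (0 :: pmBuildH s 0)
        (1 :: pmBuildPw (s.length : Int).toNat 1)
        ((PySem.List.count (np.map (fun c => c == 'x')) true : Nat) : Int)
        ((np.length : Int) - ((PySem.List.count (np.map (fun c => c == 'x')) true : Nat) : Int))
        (((PySem.List.index? (np.map (fun c => c == 'x')) false).getD 0 : Nat) : Int)
        lead
        (PySem.List.pyRange 1 (s.length : Int) 1)) := by
  set msk := np.map (fun c => c == 'x') with hmsk
  have hcxB : (PySem.List.count msk true : Nat) = np.countP (fun c => c == 'x') := by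
    rw [count_true_eq, hmsk, countP_id_map]
  have hcyB : ((np.length : Int) - ((PySem.List.count msk true : Nat) : Int))
      = ((np.countP (fun c => !(c == 'x')) : Nat) : Int) := by
    rw [hcxB, countP_not_eq]
  have hcx1 : 1 ≤ np.countP (fun c => c == 'x') := by
    rw [hnp, List.countP_cons]
    simp
  rw [hcyB, hcxB]
  by_cases hcy0 : ((np.countP (fun c => !(c == 'x')) : Nat) : Int) = 0
  · -- one-letter pattern: A's block loop vs B's repetition test
    rw [if_pos (Or.inr hcy0), if_pos hcy0]
    have hcnt : (if ((np.countP (fun c => c == 'x') : Nat) : Int) ≠ 0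
        then ((np.countP (fun c => c == 'x') : Nat) : Int)
        else ((np.countP (fun c => !(c == 'x')) : Nat) : Int))
        = ((np.countP (fun c => c == 'x') : Nat) : Int) := by
      rw [if_pos (by exact_mod_cast Nat.one_le_iff_ne_zero.mp hcx1)]
    rw [hcnt]
    set cnt := ((np.countP (fun c => c == 'x') : Nat) : Int) with hcntdef
    have hcntpos : 0 < cnt := by
      rw [hcntdef]; exact_mod_cast hcx1
    by_cases hmod : PySem.Int.mod (s.length : Int) cnt ≠ 0
    · rw [if_pos hmod, if_pos hmod]
    · rw [if_neg hmod, if_neg hmod]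
      push_neg at hmod
      have hslice0 : PySem.List.slice s (some 0) (some (PySem.Int.floordiv (s.length : Int) cnt))
          = PySem.List.slice s none (some (PySem.Int.floordiv (s.length : Int) cnt)) := by
        simp
      have hiff := single_branch_eq s cnt hcntpos hmod
      by_cases hbl : pmBlocksA s
          (PySem.List.slice s (some 0) (some (PySem.Int.floordiv (s.length : Int) cnt)))
          (PySem.Int.floordiv (s.length : Int) cnt) (PySem.List.pyRange 1 cnt 1) = true
      · rw [if_pos hbl,
          if_neg (show ¬(PySem.List.pyRepeat (PySem.List.slice s none
              (some (PySem.Int.floordiv (s.length : Int) cnt))) cnt ≠ s) from by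
            rw [← hslice0]
            exact not_not_intro (hiff.mp hbl))]
        rw [hslice0]
        cases lead <;> simp
      · rw [if_neg hbl,
          if_pos (show PySem.List.pyRepeat (PySem.List.slice s none
              (some (PySem.Int.floordiv (s.length : Int) cnt))) cnt ≠ s from by
            rw [← hslice0]
            exact fun h => hbl (hiff.mpr h))]
  · -- both letters present: the main loops
    have hcx0 : ¬ ((np.countP (fun c => c == 'x') : Nat) : Int) = 0 := by
      exact_mod_cast Nat.one_le_iff_ne_zero.mp hcx1
    rw [if_neg (by push_neg; exact ⟨hcx0, hcy0⟩), if_neg hcy0]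
    have hfalse : false ∈ msk := by
      have : 0 < msk.countP (fun b => !b) := by
        rw [hmsk, countP_not_map]
        omega
      obtain ⟨b, hb, hbp⟩ := List.countP_pos_iff.mp this
      cases b
      · exact hb
      · exact absurd hbp (by simp)
    obtain ⟨py0, hpy⟩ := Option.isSome_iff_exists.mp
      ((PySem.List.index?_isSome_iff msk false).mpr hfalse)
    rw [map_getD_py]
    refine pmLoop_eq np s _ _ _ lead rfl rfl (by exact_mod_cast hcx1) (by omega) py0 hpy
      (by rw [hpy]; simp) (PySem.List.pyRange 1 (s.length : Int) 1) ?_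
    intro e he
    rw [PySem.List.mem_pyRange_one] at he
    exact ⟨by omega, he.2⟩

-- ===== VERDICT =====
theorem patternMatcher_spec : Claim_equal_patternMatcher := by
  intro pattern string _
  show patternMatcher pattern string = patternMatcher_alt pattern string
  unfold patternMatcher patternMatcher_alt
  by_cases hg : pattern = "" ∨ PySem.Str.len pattern > PySem.Str.len string
  · rw [if_pos hg, if_pos hg]
  · rw [if_neg hg, if_neg hg]
    have hpne : pattern.toList ≠ [] := by
      intro h
      exact hg (Or.inl (by simpa using congrArg String.ofList h))
    obtain ⟨c, cs, hc⟩ := List.exists_cons_of_ne_nil hpne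
    simp only [separartion_eq, PySem.Str.len_eq, hc, PySem.List.pyGetD_zero_cons, pmCountA_eq]
    by_cases hcc : c = 'x'
    · have hflag : (if c ≠ 'x' then (some 1 : Option Int) else none) = none :=
        if_neg (by simp [hcc])
      have hlead : (c == 'x') = true := by simp [hcc]
      have hisx : (c :: cs).map (fun a => (a == 'x') == (c == 'x'))
          = (c :: cs).map (fun a => a == 'x') := by
        rw [hlead]
        refine List.map_congr_left ?_
        intro a _
        simp
      simp only [hflag, hlead, hisx, reduceIte]
      have := core_eq (c :: cs) string.toList true cs (by rw [hcc])
      simpa using this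
    · have hflag : (if c ≠ 'x' then (some 1 : Option Int) else none) = some 1 := if_pos hcc
      have hlead : (c == 'x') = false := by simp [hcc]
      have hisx : (c :: cs).map (fun a => (a == 'x') == false)
          = (pmFlipA (c :: cs)).map (fun a => a == 'x') := by
        rw [pmFlipA_mask, List.map_map]
        refine List.map_congr_left ?_
        intro a _
        simp
      have hlen : ((pmFlipA (c :: cs)).length : Int) = ((c :: cs).length : Int) := by
        simp [pmFlipA]
      simp only [hflag, hlead, reduceIte]
      rw [hisx]
      have := core_eq (pmFlipA (c :: cs)) string.toList false
        ((c :: cs).tail.map (fun c => if c = 'x' then 'y' else 'x'))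
        (by simp [pmFlipA, hcc])
      rw [hlen] at this
      simpa using this
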